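-- pv_equiv track=rewrite | github.com/PMCC-BioinformaticsCore/janis-core | janis_core/translations/nextflow/nfgen_utils.py | _cast_keywords
-- ===== SOURCE A (Python) =====
-- def _cast_keywords(val: str) -> str:
--     # this is done in string world - need a better way of handling lists!
--     keyword_map: dict[str, str] = {
--         'None': 'null',
--         'False': 'false',
--         'True': 'true',
--     }
--     for python_val, groovy_val in keyword_map.items():
--         if python_val in val:
--             val = val.replace(python_val, groovy_val)
--     return val
-- ===== SOURCE B (Python) =====
-- def _cast_keywords(val: str) -> str:
--     # Single left-to-right scan: at each position substitute the first matching
--     # keyword from the table and jump past it, instead of three full replace passes.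
--     keyword_map: dict[str, str] = {
--         'None': 'null',
--         'False': 'false',
--         'True': 'true',
--     }
--     out = []
--     i = 0
--     n = len(val)
--     while i < n:
--         for python_val, groovy_val in keyword_map.items():
--             if val.startswith(python_val, i):
--                 out.append(groovy_val)
--                 i += len(python_val)
--                 break
--         else:
--             out.append(val[i])
--             i += 1
--     return ''.join(out)
-- ===== Notes on version B (the rewrite author's own statement) =====
-- stated objective: alternative
-- what changed: Replaces A's three independent full-string replace passes with one left-to-right scan that substitutes each keyword via a lookup table as it is encountered.
import Mathlib
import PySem

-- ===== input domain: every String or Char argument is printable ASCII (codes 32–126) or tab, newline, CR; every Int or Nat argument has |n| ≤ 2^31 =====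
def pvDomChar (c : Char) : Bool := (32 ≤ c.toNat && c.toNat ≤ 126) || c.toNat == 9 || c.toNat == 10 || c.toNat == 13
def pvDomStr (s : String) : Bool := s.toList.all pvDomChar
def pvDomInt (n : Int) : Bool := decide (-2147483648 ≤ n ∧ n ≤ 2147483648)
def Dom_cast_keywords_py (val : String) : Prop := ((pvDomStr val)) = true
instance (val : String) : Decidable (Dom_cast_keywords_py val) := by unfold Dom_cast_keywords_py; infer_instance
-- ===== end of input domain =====

set_option maxRecDepth 8192


-- B replaces A's three independent full-string replace passes by ONE left-to-right
-- scan that substitutes each keyword from the table as it is met (alternative, same cost).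

-- ===== PORT A =====
-- for python_val, groovy_val in keyword_map.items(): if python_val in val: val = val.replace(python_val, groovy_val)
def cast_keywords_py (val : String) : String :=
  let keyword_map : PySem.Dict String String :=
    ((PySem.Dict.empty.insert "None" "null").insert "False" "false").insert "True" "true"
  keyword_map.items.foldl
    (fun v kv => if PySem.Str.isIn kv.1 v then PySem.Str.replace v kv.1 kv.2 else v) val

-- ===== PORT B =====
-- the keyword table of Source B, as char lists (the scan works position by position)
def pvKwNone : List Char := ['N', 'o', 'n', 'e']
def pvKwFalse : List Char := ['F', 'a', 'l', 's', 'e']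
def pvKwTrue : List Char := ['T', 'r', 'u', 'e']
def pvRepNull : List Char := ['n', 'u', 'l', 'l']
def pvRepFalse : List Char := ['f', 'a', 'l', 's', 'e']
def pvRepTrue : List Char := ['t', 'r', 'u', 'e']

-- the while-loop of Source B: at each position try the table entries in order
-- (val.startswith(kw, i) is kw.isPrefixOf of the remaining characters), else copy one char
def pvScanB : List Char → List Char
  | [] => []
  | c :: t =>
    if pvKwNone.isPrefixOf (c :: t) then pvRepNull ++ pvScanB (t.drop 3)
    else if pvKwFalse.isPrefixOf (c :: t) then pvRepFalse ++ pvScanB (t.drop 4)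
    else if pvKwTrue.isPrefixOf (c :: t) then pvRepTrue ++ pvScanB (t.drop 3)
    else c :: pvScanB t
  termination_by s => s.length
  decreasing_by all_goals simp


def cast_keywords_py_alt (val : String) : String := String.ofList (pvScanB val.toList)

-- ===== PRECONDITION & SPEC =====
def Spec_cast_keywords_py (val : String) (out : String) : Prop := out = cast_keywords_py_alt val
instance (val : String) (out : String) : Decidable (Spec_cast_keywords_py val out) := by unfold Spec_cast_keywords_py; infer_instance

-- ===== CLAIM (what is proved, stated in full; the proofs are below) =====
def Claim_equal_cast_keywords_py : Prop := ∀ (val : String), Dom_cast_keywords_py val → Spec_cast_keywords_py val (cast_keywords_py val)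

-- ===== LEMMAS AND PROOFS =====

-- one-keyword left-to-right scan: what a single str.replace pass computes
def pvScan1 (k : Char) (kw' rep : List Char) : List Char → List Char
  | [] => []
  | c :: t =>
    if (k :: kw').isPrefixOf (c :: t) then rep ++ pvScan1 k kw' rep (t.drop kw'.length)
    else c :: pvScan1 k kw' rep t
  termination_by s => s.length
  decreasing_by all_goals simp
theorem pvGo_eq (k : Char) (kw' rep : List Char) :
    ∀ (fuel : Nat) (l acc : List Char), l.length ≤ fuel →
      PySem.Chars.replace.go (k :: kw') rep fuel l acc = acc.reverse ++ pvScan1 k kw' rep l := by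
  intro fuel
  induction fuel with
  | zero =>
    intro l acc h
    have : l = [] := by cases l <;> simp_all
    subst this
    simp [PySem.Chars.replace.go, pvScan1]
  | succ n ih =>
    intro l acc h
    cases l with
    | nil => simp [PySem.Chars.replace.go, pvScan1]
    | cons c t =>
      rw [PySem.Chars.replace.go]
      by_cases hp : (k :: kw').isPrefixOf (c :: t) = true
      · rw [if_pos hp, ih _ _ (by simp at h ⊢; omega)]
        rw [pvScan1, if_pos hp]
        simp
      · rw [if_neg hp, ih _ _ (by simp at h ⊢; omega)]
        rw [pvScan1, if_neg hp]
        simp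

theorem pvReplace_eq (k : Char) (kw' rep s : List Char) :
    PySem.Chars.replace s (k :: kw') rep = pvScan1 k kw' rep s := by
  rw [PySem.Chars.replace]
  simp [pvGo_eq k kw' rep s.length s [] (le_refl _)]

theorem pvScan1_not_infix (k : Char) (kw' rep : List Char) :
    ∀ s, ¬ (k :: kw') <:+: s → pvScan1 k kw' rep s = s := by
  intro s
  induction s with
  | nil => intro h; rw [pvScan1]
  | cons c t ih =>
    intro h
    have hp : ¬ (k :: kw').isPrefixOf (c :: t) = true := by
      intro hc
      exact h ((List.isPrefixOf_iff_prefix.mp hc).isInfix)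
    rw [pvScan1, if_neg hp, ih (fun hi => h (hi.trans (List.suffix_cons c t).isInfix))]

theorem pvScan1_append (k : Char) (kw' rep : List Char) :
    ∀ (a x : List Char), (∀ c ∈ a, c ≠ k) → pvScan1 k kw' rep (a ++ x) = a ++ pvScan1 k kw' rep x := by
  intro a
  induction a with
  | nil => intro x h; simp
  | cons c a' ih =>
    intro x h
    have hck : c ≠ k := h c (by simp)
    have hp : ¬ (k :: kw').isPrefixOf (c :: (a' ++ x)) = true := by
      simp [List.isPrefixOf]
      intro hk; exact fun _ => (hck hk.symm).elim
    rw [List.cons_append, pvScan1, if_neg hp, ih x (fun d hd => h d (by simp [hd]))]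
    simp

theorem pvPrefix_scan1 (k r0 : Char) (kw' rep' : List Char) :
    ∀ (t p : List Char), (∀ c ∈ p, c ≠ k) → (∀ c ∈ p, c ≠ r0) →
      (p <+: pvScan1 k kw' (r0 :: rep') t ↔ p <+: t) := by
  intro t
  induction t with
  | nil => intro p h1 h2; rw [pvScan1]
  | cons c t ih =>
    intro p h1 h2
    by_cases hp : (k :: kw').isPrefixOf (c :: t) = true
    · rw [pvScan1, if_pos hp]
      cases p with
      | nil => simp
      | cons q p' =>
        have hc : c = k := by
          rcases List.isPrefixOf_iff_prefix.mp hp with ⟨u, hu⟩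
          cases hu; rfl
        rw [List.cons_append]
        constructor
        · intro hpre
          rcases List.cons_prefix_cons.mp hpre with ⟨hq, _⟩
          exact absurd hq (h2 q (by simp))
        · intro hpre
          rcases List.cons_prefix_cons.mp hpre with ⟨hq, _⟩
          exact absurd (hq.trans hc) (h1 q (by simp))
    · rw [pvScan1, if_neg hp]
      cases p with
      | nil => simp
      | cons q p' =>
        rw [List.cons_prefix_cons, List.cons_prefix_cons,
          ih p' (fun d hd => h1 d (by simp [hd])) (fun d hd => h2 d (by simp [hd]))]

theorem pvMain : ∀ (n : Nat) (s : List Char), s.length ≤ n →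
    pvScan1 'T' ['r', 'u', 'e'] pvRepTrue
      (pvScan1 'F' ['a', 'l', 's', 'e'] pvRepFalse
        (pvScan1 'N' ['o', 'n', 'e'] pvRepNull s)) = pvScanB s := by
  intro n
  induction n with
  | zero =>
    intro s h
    have hs : s = [] := by cases s <;> simp_all
    subst hs
    rw [pvScan1, pvScan1, pvScan1, pvScanB]
  | succ n ih =>
    intro s h
    cases s with
    | nil => rw [pvScan1, pvScan1, pvScan1, pvScanB]
    | cons c t =>
      by_cases hN : ('N' :: ['o', 'n', 'e']).isPrefixOf (c :: t) = true
      · rcases List.isPrefixOf_iff_prefix.mp hN with ⟨r, hr⟩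
        simp only [List.cons_append, List.nil_append, List.cons.injEq] at hr
        obtain ⟨hc, hrr⟩ := hr
        subst hc; subst hrr
        rw [show pvScan1 'N' ['o', 'n', 'e'] pvRepNull ('N' :: 'o' :: 'n' :: 'e' :: r)
              = pvRepNull ++ pvScan1 'N' ['o', 'n', 'e'] pvRepNull r from by
            rw [pvScan1]; simp [List.isPrefixOf]]
        rw [pvScan1_append 'F' ['a', 'l', 's', 'e'] pvRepFalse pvRepNull _ (by simp [pvRepNull])]
        rw [pvScan1_append 'T' ['r', 'u', 'e'] pvRepTrue pvRepNull _ (by simp [pvRepNull])]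
        rw [ih r (by simp at h; omega)]
        rw [pvScanB, if_pos (by simp [pvKwNone, hN])]
        rfl
      · by_cases hF : ('F' :: ['a', 'l', 's', 'e']).isPrefixOf (c :: t) = true
        · rcases List.isPrefixOf_iff_prefix.mp hF with ⟨r, hr⟩
          simp only [List.cons_append, List.nil_append, List.cons.injEq] at hr
          obtain ⟨hc, hrr⟩ := hr
          subst hc; subst hrr
          rw [show pvScan1 'N' ['o', 'n', 'e'] pvRepNull ('F' :: 'a' :: 'l' :: 's' :: 'e' :: r)
                = 'F' :: 'a' :: 'l' :: 's' :: 'e' :: pvScan1 'N' ['o', 'n', 'e'] pvRepNull r from by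
              have := pvScan1_append 'N' ['o', 'n', 'e'] pvRepNull ['F', 'a', 'l', 's', 'e'] r (by simp)
              simpa using this]
          rw [show pvScan1 'F' ['a', 'l', 's', 'e'] pvRepFalse
                ('F' :: 'a' :: 'l' :: 's' :: 'e' :: pvScan1 'N' ['o', 'n', 'e'] pvRepNull r)
                = pvRepFalse ++ pvScan1 'F' ['a', 'l', 's', 'e'] pvRepFalse
                    (pvScan1 'N' ['o', 'n', 'e'] pvRepNull r) from by
              rw [pvScan1]; simp [List.isPrefixOf]]
          rw [pvScan1_append 'T' ['r', 'u', 'e'] pvRepTrue pvRepFalse _ (by simp [pvRepFalse])]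
          rw [ih r (by simp at h; omega)]
          rw [pvScanB, if_neg (by simp [pvKwNone, hN]), if_pos (by simp [pvKwFalse, hF])]
          rfl
        · by_cases hT : ('T' :: ['r', 'u', 'e']).isPrefixOf (c :: t) = true
          · rcases List.isPrefixOf_iff_prefix.mp hT with ⟨r, hr⟩
            simp only [List.cons_append, List.nil_append, List.cons.injEq] at hr
            obtain ⟨hc, hrr⟩ := hr
            subst hc; subst hrr
            rw [show pvScan1 'N' ['o', 'n', 'e'] pvRepNull ('T' :: 'r' :: 'u' :: 'e' :: r)
                  = 'T' :: 'r' :: 'u' :: 'e' :: pvScan1 'N' ['o', 'n', 'e'] pvRepNull r from by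
                have := pvScan1_append 'N' ['o', 'n', 'e'] pvRepNull ['T', 'r', 'u', 'e'] r (by simp)
                simpa using this]
            rw [show pvScan1 'F' ['a', 'l', 's', 'e'] pvRepFalse
                  ('T' :: 'r' :: 'u' :: 'e' :: pvScan1 'N' ['o', 'n', 'e'] pvRepNull r)
                  = 'T' :: 'r' :: 'u' :: 'e' :: pvScan1 'F' ['a', 'l', 's', 'e'] pvRepFalse
                      (pvScan1 'N' ['o', 'n', 'e'] pvRepNull r) from by
                have := pvScan1_append 'F' ['a', 'l', 's', 'e'] pvRepFalse ['T', 'r', 'u', 'e']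
                  (pvScan1 'N' ['o', 'n', 'e'] pvRepNull r) (by simp)
                simpa using this]
            rw [show pvScan1 'T' ['r', 'u', 'e'] pvRepTrue
                  ('T' :: 'r' :: 'u' :: 'e' :: pvScan1 'F' ['a', 'l', 's', 'e'] pvRepFalse
                    (pvScan1 'N' ['o', 'n', 'e'] pvRepNull r))
                  = pvRepTrue ++ pvScan1 'T' ['r', 'u', 'e'] pvRepTrue
                      (pvScan1 'F' ['a', 'l', 's', 'e'] pvRepFalse
                        (pvScan1 'N' ['o', 'n', 'e'] pvRepNull r)) from by
                rw [pvScan1]; simp [List.isPrefixOf]]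
            rw [ih r (by simp at h; omega)]
            rw [pvScanB, if_neg (by simp [pvKwNone, hN]),
              if_neg (by simp [pvKwFalse, hF]), if_pos (by simp [pvKwTrue, hT])]
            rfl
          · -- no keyword matches at this position
            rw [show pvScan1 'N' ['o', 'n', 'e'] pvRepNull (c :: t)
                  = c :: pvScan1 'N' ['o', 'n', 'e'] pvRepNull t from by
                rw [pvScan1, if_neg hN]]
            have hF2 : ¬ ('F' :: ['a', 'l', 's', 'e']).isPrefixOf
                (c :: pvScan1 'N' ['o', 'n', 'e'] pvRepNull t) = true := by
              intro hc
              rcases List.cons_prefix_cons.mp (List.isPrefixOf_iff_prefix.mp hc) with ⟨hq, hrest⟩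
              have : (['a', 'l', 's', 'e'] : List Char) <+: t :=
                (pvPrefix_scan1 'N' 'n' ['o', 'n', 'e'] ['u', 'l', 'l'] t
                  ['a', 'l', 's', 'e'] (by simp) (by simp)).mp hrest
              exact hF (List.isPrefixOf_iff_prefix.mpr
                (List.cons_prefix_cons.mpr ⟨hq, this⟩))
            rw [show pvScan1 'F' ['a', 'l', 's', 'e'] pvRepFalse
                  (c :: pvScan1 'N' ['o', 'n', 'e'] pvRepNull t)
                  = c :: pvScan1 'F' ['a', 'l', 's', 'e'] pvRepFalse
                      (pvScan1 'N' ['o', 'n', 'e'] pvRepNull t) from by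
                rw [pvScan1, if_neg hF2]]
            have hT2 : ¬ ('T' :: ['r', 'u', 'e']).isPrefixOf
                (c :: pvScan1 'F' ['a', 'l', 's', 'e'] pvRepFalse
                  (pvScan1 'N' ['o', 'n', 'e'] pvRepNull t)) = true := by
              intro hc
              rcases List.cons_prefix_cons.mp (List.isPrefixOf_iff_prefix.mp hc) with ⟨hq, hrest⟩
              have h1 : (['r', 'u', 'e'] : List Char) <+: pvScan1 'N' ['o', 'n', 'e'] pvRepNull t :=
                (pvPrefix_scan1 'F' 'f' ['a', 'l', 's', 'e'] ['a', 'l', 's', 'e'] _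
                  ['r', 'u', 'e'] (by simp) (by simp)).mp hrest
              have h2 : (['r', 'u', 'e'] : List Char) <+: t :=
                (pvPrefix_scan1 'N' 'n' ['o', 'n', 'e'] ['u', 'l', 'l'] t
                  ['r', 'u', 'e'] (by simp) (by simp)).mp h1
              exact hT (List.isPrefixOf_iff_prefix.mpr
                (List.cons_prefix_cons.mpr ⟨hq, h2⟩))
            rw [show pvScan1 'T' ['r', 'u', 'e'] pvRepTrue
                  (c :: pvScan1 'F' ['a', 'l', 's', 'e'] pvRepFalse
                    (pvScan1 'N' ['o', 'n', 'e'] pvRepNull t))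
                  = c :: pvScan1 'T' ['r', 'u', 'e'] pvRepTrue
                      (pvScan1 'F' ['a', 'l', 's', 'e'] pvRepFalse
                        (pvScan1 'N' ['o', 'n', 'e'] pvRepNull t)) from by
                rw [pvScan1, if_neg hT2]]
            rw [ih t (by simp at h; omega)]
            rw [pvScanB, if_neg (by simp [pvKwNone, hN]),
              if_neg (by simp [pvKwFalse, hF]), if_neg (by simp [pvKwTrue, hT])]

-- a guarded replace step of A equals the unguarded replace (replace of an absent keyword is the identity)
theorem pvStep (v kw rep : String) (k : Char) (kw' : List Char) (hkw : kw.toList = k :: kw') :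
    (if PySem.Str.isIn kw v then PySem.Str.replace v kw rep else v) = PySem.Str.replace v kw rep := by
  by_cases h : PySem.Str.isIn kw v = true
  · rw [if_pos h]
  · rw [if_neg h]
    have hinf : ¬ kw.toList <:+: v.toList := fun hi =>
      h ((PySem.Str.isIn_iff_infix kw v).mpr hi)
    apply String.toList_inj.mp
    rw [PySem.Str.toList_replace, hkw, pvReplace_eq,
      pvScan1_not_infix k kw' rep.toList v.toList (hkw ▸ hinf)]

-- ===== VERDICT (by name: the statement is the Claim_ definition above) =====
theorem cast_keywords_py_spec : Claim_equal_cast_keywords_py := by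
  unfold Claim_equal_cast_keywords_py
  intro val _
  unfold Spec_cast_keywords_py cast_keywords_py cast_keywords_py_alt
  show ((((PySem.Dict.empty.insert "None" "null").insert "False" "false").insert "True" "true" :
      PySem.Dict String String).items).foldl
      (fun v kv => if PySem.Str.isIn kv.1 v then PySem.Str.replace v kv.1 kv.2 else v) val
      = String.ofList (pvScanB val.toList)
  rw [show (((PySem.Dict.empty.insert "None" "null").insert "False" "false").insert "True" "true" :
      PySem.Dict String String).items = [("None", "null"), ("False", "false"), ("True", "true")] from rfl]
  simp only [List.foldl]
  rw [pvStep val "None" "null" 'N' ['o', 'n', 'e'] rfl,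
    pvStep _ "False" "false" 'F' ['a', 'l', 's', 'e'] rfl,
    pvStep _ "True" "true" 'T' ['r', 'u', 'e'] rfl]
  apply String.toList_inj.mp
  rw [String.toList_ofList, PySem.Str.toList_replace, PySem.Str.toList_replace,
    PySem.Str.toList_replace]
  rw [show ("None".toList : List Char) = 'N' :: ['o', 'n', 'e'] from rfl,
    show ("False".toList : List Char) = 'F' :: ['a', 'l', 's', 'e'] from rfl,
    show ("True".toList : List Char) = 'T' :: ['r', 'u', 'e'] from rfl,
    show ("null".toList : List Char) = pvRepNull from rfl,
    show ("false".toList : List Char) = pvRepFalse from rfl,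
    show ("true".toList : List Char) = pvRepTrue from rfl]
  rw [pvReplace_eq, pvReplace_eq, pvReplace_eq]
  exact pvMain val.toList.length val.toList (le_refl _)
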